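-- pv_equiv track=rewrite | github.com/sealtd-robotics/base_station_analytics | check_msg_frequency.py | crc24quick
-- ===== SOURCE A (Python) =====
-- def crc24quick(crc, size, buffer):
--     crctab = [0x00000000,0x01864CFB,0x038AD50D,0x020C99F6,0x0793E6E1,0x0615AA1A,0x041933EC,0x059F7F17,
--     0x0FA18139,0x0E27CDC2,0x0C2B5434,0x0DAD18CF,0x083267D8,0x09B42B23,0x0BB8B2D5,0x0A3EFE2E]
--
--     i = 0
--     while (size):
--         crc ^= (buffer[i] << 16)
--         crc = (crc << 4) ^ crctab[(crc >> 20) & 0x0F]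
--         crc = (crc << 4) ^ crctab[(crc >> 20) & 0x0F]
--         size -= 1
--         i += 1
--
--     return (crc & 0xFFFFFF)
-- ===== SOURCE B (Python) =====
-- def crc24quick(crc, size, buffer):
--     POLY = 0x1864CFB
--     for i in range(size):
--         crc ^= buffer[i] << 16
--         for _ in range(8):
--             if crc & 0x800000:
--                 crc = (crc << 1) ^ POLY
--             else:
--                 crc <<= 1
--     return crc & 0xFFFFFF
-- ===== Notes on version B (the rewrite author's own statement) =====
-- stated objective: simpler
-- what changed: Replaces the precomputed 16-entry nibble table and the two table-lookup half-steps per byte with a table-free bitwise CRC-24: an inner 8-iteration loop that shifts one bit at a time and conditionally xors the polynomial 0x1864CFB when bit 23 is set.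
import Mathlib
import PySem

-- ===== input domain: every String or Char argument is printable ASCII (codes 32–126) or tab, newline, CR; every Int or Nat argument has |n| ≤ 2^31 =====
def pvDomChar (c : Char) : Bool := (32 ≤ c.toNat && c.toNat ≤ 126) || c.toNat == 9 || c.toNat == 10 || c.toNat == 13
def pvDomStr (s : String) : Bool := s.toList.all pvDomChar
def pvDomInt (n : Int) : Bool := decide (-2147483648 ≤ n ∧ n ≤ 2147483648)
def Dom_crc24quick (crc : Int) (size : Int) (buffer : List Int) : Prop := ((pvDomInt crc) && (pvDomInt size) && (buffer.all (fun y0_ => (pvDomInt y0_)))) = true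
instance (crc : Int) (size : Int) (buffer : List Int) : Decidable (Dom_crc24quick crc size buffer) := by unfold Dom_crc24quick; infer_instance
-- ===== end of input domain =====

-- B replaces A's 16-entry nibble table and its two table-lookup half-steps per byte by a
-- table-free bitwise CRC-24 (8 shift-and-conditionally-xor-the-polynomial steps per byte): simpler, same cost.

-- ===== PORT A =====
def pvCrcTab : List Int := [0x00000000, 0x01864CFB, 0x038AD50D, 0x020C99F6, 0x0793E6E1, 0x0615AA1A, 0x041933EC, 0x059F7F17,
  0x0FA18139, 0x0E27CDC2, 0x0C2B5434, 0x0DAD18CF, 0x083267D8, 0x09B42B23, 0x0BB8B2D5, 0x0A3EFE2E]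

-- the 'while (size)' loop of A: counts size down, walks index i up, two nibble steps per byte
def pvLoopA : Nat → Int → Int → List Int → Int
  | 0, crc, _, _ => crc
  | n + 1, crc, i, buffer =>
      let c1 := PySem.Int.bxor crc ((PySem.List.pyGetD buffer i 0) <<< (16 : Nat))
      let c2 := PySem.Int.bxor (c1 <<< (4 : Nat)) (PySem.List.pyGetD pvCrcTab (PySem.Int.band (c1 >>> (20 : Nat)) 0x0F) 0)
      let c3 := PySem.Int.bxor (c2 <<< (4 : Nat)) (PySem.List.pyGetD pvCrcTab (PySem.Int.band (c2 >>> (20 : Nat)) 0x0F) 0)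
      pvLoopA n c3 (i + 1) buffer

def crc24quick (crc : Int) (size : Int) (buffer : List Int) : Int :=
  PySem.Int.band (pvLoopA size.toNat crc 0 buffer) 0xFFFFFF

-- ===== PORT B =====
-- one bit of polynomial division: shift left, xor the polynomial if bit 23 was set
def pvBitStep (crc : Int) : Int :=
  if PySem.Int.band crc 0x800000 ≠ 0 then PySem.Int.bxor (crc <<< (1 : Nat)) 0x1864CFB else crc <<< (1 : Nat)

-- 'for _ in range(8)'
def pvBits : Nat → Int → Int
  | 0, crc => crc
  | n + 1, crc => pvBits n (pvBitStep crc)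

-- 'for i in range(size)': eight bit steps per byte, no table
def pvLoopB : Nat → Int → Int → List Int → Int
  | 0, crc, _, _ => crc
  | n + 1, crc, i, buffer =>
      pvLoopB n (pvBits 8 (PySem.Int.bxor crc ((PySem.List.pyGetD buffer i 0) <<< (16 : Nat)))) (i + 1) buffer

def crc24quick_alt (crc : Int) (size : Int) (buffer : List Int) : Int :=
  PySem.Int.band (pvLoopB size.toNat crc 0 buffer) 0xFFFFFF

-- ===== PRECONDITION & SPEC =====
-- A raises IndexError when size > len(buffer) and loops forever when size < 0; exactly those inputs are excluded.
def Pre_crc24quick (crc : Int) (size : Int) (buffer : List Int) : Prop :=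
  0 ≤ size ∧ size ≤ (buffer.length : Int)
instance (crc : Int) (size : Int) (buffer : List Int) : Decidable (Pre_crc24quick crc size buffer) := by unfold Pre_crc24quick; infer_instance

def pvWitness_crc24quick : Int × Int × List Int := (305419896, 3, [17, -250, 1000000])

def Spec_crc24quick (crc : Int) (size : Int) (buffer : List Int) (out : Int) : Prop := out = crc24quick_alt crc size buffer
instance (crc : Int) (size : Int) (buffer : List Int) (out : Int) : Decidable (Spec_crc24quick crc size buffer out) := by unfold Spec_crc24quick; infer_instance

-- ===== CLAIM (what is proved, stated in full; the proofs are below) =====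
def Claim_equal_crc24quick : Prop := ∀ (crc : Int) (size : Int) (buffer : List Int), Dom_crc24quick crc size buffer → Pre_crc24quick crc size buffer → Spec_crc24quick crc size buffer (crc24quick crc size buffer)


-- ===== LEMMAS AND PROOFS =====

-- the low 24 bits of an integer, as a natural number
def pvLow (x : Int) : Nat := (x % 16777216).toNat

-- A's table as naturals, for reasoning in ℕ
def pvNTab : List Nat := [0x00000000, 0x01864CFB, 0x038AD50D, 0x020C99F6, 0x0793E6E1, 0x0615AA1A, 0x041933EC, 0x059F7F17,
  0x0FA18139, 0x0E27CDC2, 0x0C2B5434, 0x0DAD18CF, 0x083267D8, 0x09B42B23, 0x0BB8B2D5, 0x0A3EFE2E]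

-- ℕ-models of A's nibble step and B's bit step, acting on the low 24 bits
def pvFA (r : Nat) : Nat := ((r <<< 4) ^^^ pvNTab.getD (r >>> 20) 0) % 16777216
def pvFB (r : Nat) : Nat := ((r <<< 1) ^^^ (if r.testBit 23 then 25578747 else 0)) % 16777216

theorem pvLow_lt (x : Int) : pvLow x < 16777216 := by
  unfold pvLow; omega

-- complement below 2^n is xor with the all-ones mask
theorem pv_sub_eq_xor (n : Nat) : ∀ v : Nat, v < 2 ^ n → 2 ^ n - 1 - v = (2 ^ n - 1) ^^^ v := by
  induction n with
  | zero => intro v hv; interval_cases v; rfl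
  | succ n ih =>
      intro v hv
      have h2 : v / 2 < 2 ^ n := by omega
      have hx2 : ((2 ^ (n + 1) - 1) ^^^ v) / 2 = (2 ^ n - 1) ^^^ (v / 2) := by
        rw [Nat.xor_div_two]; congr 1; omega
      have hx1 : ((2 ^ (n + 1) - 1) ^^^ v) % 2 = (2 ^ (n + 1) - 1 + v) % 2 := Nat.xor_mod_two_eq
      have hm : (2 ^ (n + 1) - 1) % 2 = 1 := by
        have : (2:ℕ) ^ (n+1) = 2 * 2^n := by ring
        omega
      have ihv := ih (v / 2) h2
      have hpow : (2:ℕ) ^ (n+1) = 2 * 2^n := by ring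
      omega

-- x & 0xFFFFFF = x mod 2^24 (Python semantics on all integers)
theorem pv_band_mask (x : Int) : PySem.Int.band x 16777215 = x % 16777216 := by
  have e : (2:ℕ)^24 - 1 = 16777215 := by norm_num
  have e2 : (2:ℕ)^24 = 16777216 := by norm_num
  unfold PySem.Int.band
  rw [show ((16777215:Int).toNat) = 16777215 from rfl]
  split_ifs with h1 h2 h2
  · have h := Nat.and_two_pow_sub_one_eq_mod x.toNat 24
    rw [e, e2] at h
    rw [h]; omega
  · norm_num at h2
  · have hc := Nat.and_two_pow_sub_one_eq_mod (-x - 1).toNat 24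
    rw [e, e2, Nat.land_comm] at hc
    rw [hc]; omega
  · norm_num at h2

-- x & 0x0F = x mod 16
theorem pv_band_nib (x : Int) : PySem.Int.band x 15 = x % 16 := by
  have e : (2:ℕ)^4 - 1 = 15 := by norm_num
  have e2 : (2:ℕ)^4 = 16 := by norm_num
  unfold PySem.Int.band
  rw [show ((15:Int).toNat) = 15 from rfl]
  split_ifs with h1 h2 h2
  · have h := Nat.and_two_pow_sub_one_eq_mod x.toNat 4
    rw [e, e2] at h
    rw [h]; omega
  · norm_num at h2
  · have hc := Nat.and_two_pow_sub_one_eq_mod (-x - 1).toNat 4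
    rw [e, e2, Nat.land_comm] at hc
    rw [hc]; omega
  · norm_num at h2

-- B's branch test: crc & 0x800000 ≠ 0 iff bit 23 of the low 24 bits is set
theorem pv_band_bit23 (x : Int) : (PySem.Int.band x 8388608 ≠ 0) ↔ (pvLow x).testBit 23 = true := by
  have htb : ∀ a : Nat, (a.testBit 23 = true) ↔ (a / 8388608 % 2 = 1) := by
    intro a; rw [Nat.testBit_eq_decide_div_mod_eq]; norm_num
  have e3 : (2:ℕ)^23 = 8388608 := by norm_num
  unfold PySem.Int.band pvLow
  rw [show ((8388608:Int).toNat) = 8388608 from rfl]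
  split_ifs with h1 h2 h2
  · have hand := Nat.and_two_pow x.toNat 23
    rw [e3] at hand
    rw [hand, htb]
    rcases h : x.toNat.testBit 23
    · have h' : ¬(x.toNat / 8388608 % 2 = 1) := by rw [← htb, h]; simp
      simp; omega
    · have h' : x.toNat / 8388608 % 2 = 1 := (htb _).mp h
      simp; omega
  · norm_num at h2
  · have hand := Nat.and_two_pow (-x - 1).toNat 23
    rw [e3] at hand
    rw [Nat.land_comm, hand, htb]
    rcases h : (-x - 1).toNat.testBit 23
    · have h' : ¬((-x - 1).toNat / 8388608 % 2 = 1) := by rw [← htb, h]; simp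
      simp; omega
    · have h' : (-x - 1).toNat / 8388608 % 2 = 1 := (htb _).mp h
      simp; omega
  · norm_num at h2

-- low bits of a xor, through all four sign cases of Python's ^
theorem pvLow_bxor (a b : Int) : pvLow (PySem.Int.bxor a b) = pvLow a ^^^ pvLow b := by
  have neg : ∀ w : Nat, ((-(w : Int) - 1) % 16777216).toNat = 16777215 - w % 16777216 := by
    intro w; omega
  have cpl : ∀ w : Nat, 16777215 - w % 16777216 = 16777215 ^^^ (w % 16777216) := by
    intro w
    have h := pv_sub_eq_xor 24 (w % 16777216) (by norm_num [Nat.mod_lt])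
    norm_num at h
    exact h
  have xm : ∀ u v : Nat, (u ^^^ v) % 16777216 = (u % 16777216) ^^^ (v % 16777216) := by
    intro u v
    have h := Nat.xor_mod_two_pow (a := u) (b := v) (n := 24)
    norm_num at h
    exact h
  unfold PySem.Int.bxor pvLow
  split_ifs with h1 h2 h2
  · have ha : a = (a.toNat : Int) := by omega
    have hb : b = (b.toNat : Int) := by omega
    rw [ha, hb]
    simp only [Int.toNat_natCast]
    have h1' : (((a.toNat ^^^ b.toNat : Nat) : Int) % 16777216).toNat = (a.toNat ^^^ b.toNat) % 16777216 := by omega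
    have h2' : (((a.toNat : Nat) : Int) % 16777216).toNat = a.toNat % 16777216 := by omega
    have h3' : (((b.toNat : Nat) : Int) % 16777216).toNat = b.toNat % 16777216 := by omega
    rw [h1', h2', h3', xm]
  · set u := a.toNat with hu
    set v := (-b - 1).toNat with hv
    have ha : a = (u : Int) := by omega
    have hb : b = -(v : Int) - 1 := by omega
    rw [ha, hb, neg (u ^^^ v), neg v]
    have h2' : (((u : Nat) : Int) % 16777216).toNat = u % 16777216 := by omega
    rw [h2', cpl v, cpl (u ^^^ v), xm]
    rw [Nat.xor_left_comm]
  · set u := (-a - 1).toNat with hu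
    set v := b.toNat with hv
    have ha : a = -(u : Int) - 1 := by omega
    have hb : b = (v : Int) := by omega
    rw [ha, hb, neg (u ^^^ v), neg u]
    have h2' : (((v : Nat) : Int) % 16777216).toNat = v % 16777216 := by omega
    rw [h2', cpl u, cpl (u ^^^ v), xm]
    rw [Nat.xor_assoc]
  · set u := (-a - 1).toNat with hu
    set v := (-b - 1).toNat with hv
    have ha : a = -(u : Int) - 1 := by omega
    have hb : b = -(v : Int) - 1 := by omega
    have hx : (((u ^^^ v : Nat) : Int) % 16777216).toNat = (u ^^^ v) % 16777216 := by omega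
    rw [ha, hb, hx, neg u, neg v, cpl u, cpl v, xm]
    rw [Nat.xor_comm 16777215 (u % 16777216), Nat.xor_assoc, ← Nat.xor_assoc 16777215 16777215, Nat.xor_self, Nat.zero_xor]

-- low bits of a left shift
theorem pvLow_shl (x : Int) (k : Nat) : pvLow (x <<< k) = ((pvLow x) <<< k) % 16777216 := by
  unfold pvLow
  rw [Int.shiftLeft_eq', Nat.shiftLeft_eq]
  have h : (x * ((2:Nat) ^ k : Nat)) % 16777216 = ((x % 16777216) * ((2:Nat) ^ k : Nat)) % 16777216 := by
    conv_rhs => rw [Int.mul_emod, Int.emod_emod_of_dvd x (by norm_num : (16777216:Int) ∣ 16777216), ← Int.mul_emod]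
  rw [h]
  set u : Nat := (x % 16777216).toNat with hu
  have hx : x % 16777216 = (u : Int) := by omega
  rw [hx, show ((u:Int) * ((2 ^ k : Nat) : Int)) = ((u * 2 ^ k : Nat) : Int) from by push_cast; ring]
  omega

theorem pv_xm (u v : Nat) : (u ^^^ v) % 16777216 = (u % 16777216) ^^^ (v % 16777216) := by
  have h := Nat.xor_mod_two_pow (a := u) (b := v) (n := 24)
  norm_num at h
  exact h

theorem pv_xeq (x t1 t2 : Nat) (h : t1 % 16777216 = t2 % 16777216) :
    (x ^^^ t1) % 16777216 = (x ^^^ t2) % 16777216 := by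
  rw [pv_xm, pv_xm, h]

theorem pv_mstep (x p : Nat) : (((x % 16777216) <<< 1) ^^^ p) % 16777216 = ((x <<< 1) ^^^ p) % 16777216 := by
  rw [Nat.shiftLeft_eq, Nat.shiftLeft_eq, pv_xm, pv_xm]
  congr 1
  omega

-- one pvFB application on a normalized state
theorem pv_H (r s t : Nat) (hs : s ≤ 23) :
    pvFB (((r <<< s) ^^^ t) % 16777216) =
      ((r <<< (s+1)) ^^^ ((t <<< 1) ^^^ (if (r.testBit (23 - s) ^^ t.testBit 23) then 25578747 else 0))) % 16777216 := by
  unfold pvFB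
  have hcond : ((((r <<< s) ^^^ t) % 16777216).testBit 23) = (r.testBit (23 - s) ^^ t.testBit 23) := by
    rw [show (16777216:ℕ) = 2^24 from by norm_num]
    rw [Nat.testBit_mod_two_pow, Nat.testBit_xor, Nat.testBit_shiftLeft]
    have hd : (decide (23 ≥ s)) = true := by simp [hs]
    rw [hd]
    simp
  rw [hcond]
  generalize (if (r.testBit (23 - s) ^^ t.testBit 23) then (25578747:ℕ) else 0) = p
  rw [pv_mstep]
  congr 1
  rw [Nat.shiftLeft_xor_distrib, ← Nat.shiftLeft_add]
  simp [Nat.xor_assoc]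

-- the crux: four bit steps of B simulate one table step of A on 24-bit states
theorem pv_core (r : Nat) (hr : r < 16777216) : pvFB (pvFB (pvFB (pvFB r))) = pvFA r := by
  have h0 : r = ((r <<< 0) ^^^ 0) % 16777216 := by
    simp [Nat.mod_eq_of_lt hr]
  have hb3 : r.testBit 23 = (r >>> 20).testBit 3 := by rw [Nat.testBit_shiftRight]
  have hb2 : r.testBit 22 = (r >>> 20).testBit 2 := by rw [Nat.testBit_shiftRight]
  have hb1 : r.testBit 21 = (r >>> 20).testBit 1 := by rw [Nat.testBit_shiftRight]
  have hb0 : r.testBit 20 = (r >>> 20).testBit 0 := by rw [Nat.testBit_shiftRight]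
  have hk16 : r >>> 20 < 16 := by
    rw [Nat.shiftRight_eq_div_pow]
    omega
  unfold pvFA
  conv_lhs => rw [h0]
  rw [pv_H r 0 0 (by norm_num)]
  simp only [zero_add]
  rw [pv_H r 1 _ (by norm_num)]
  simp only [Nat.reduceAdd]
  rw [pv_H r 2 _ (by norm_num)]
  simp only [Nat.reduceAdd]
  rw [pv_H r 3 _ (by norm_num)]
  simp only [Nat.reduceAdd, Nat.reduceSub]
  set k := r >>> 20 with hk
  interval_cases k <;>
    rw [hb3, hb2, hb1, hb0] <;>
    exact pv_xeq _ _ _ (by decide)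

-- B's single bit step, on the low 24 bits
theorem pvLow_bitStep (c : Int) : pvLow (pvBitStep c) = pvFB (pvLow c) := by
  unfold pvBitStep pvFB
  by_cases h : PySem.Int.band c 8388608 ≠ 0
  · have hb := (pv_band_bit23 c).mp h
    rw [if_pos h, hb, if_pos rfl, pvLow_bxor, pvLow_shl, pv_xm]
    congr 1
  · have hb : (pvLow c).testBit 23 = false := by
      rcases hb' : (pvLow c).testBit 23
      · rfl
      · exact absurd ((pv_band_bit23 c).mpr hb') h
    rw [if_neg h, hb, pvLow_shl]
    simp

-- A's nibble step, on the low 24 bits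
theorem pvLow_halfStep (c : Int) :
    pvLow (PySem.Int.bxor (c <<< (4 : Nat)) (PySem.List.pyGetD pvCrcTab (PySem.Int.band (c >>> (20 : Nat)) 0x0F) 0)) = pvFA (pvLow c) := by
  have hidx : PySem.Int.band (c >>> (20 : Nat)) 0x0F = (((pvLow c) >>> 20 : Nat) : Int) := by
    rw [pv_band_nib, Int.shiftRight_eq_div_pow]
    rw [Nat.shiftRight_eq_div_pow]
    unfold pvLow
    norm_num
    omega
  have hk16 : (pvLow c) >>> 20 < 16 := by
    rw [Nat.shiftRight_eq_div_pow]
    have := pvLow_lt c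
    omega
  rw [hidx, PySem.List.pyGetD_natCast]
  have htab : pvLow (pvCrcTab.getD ((pvLow c) >>> 20) 0) = (pvNTab.getD ((pvLow c) >>> 20) 0) % 16777216 := by
    set k := (pvLow c) >>> 20 with hk
    interval_cases k <;> rfl
  rw [pvLow_bxor, pvLow_shl, htab]
  unfold pvFA
  rw [pv_xm]

-- eight bit steps, on the low 24 bits
theorem pvLow_bits8 (c : Int) :
    pvLow (pvBits 8 c) = pvFB (pvFB (pvFB (pvFB (pvFB (pvFB (pvFB (pvFB (pvLow c)))))))) := by
  show pvLow (pvBitStep (pvBitStep (pvBitStep (pvBitStep (pvBitStep (pvBitStep (pvBitStep (pvBitStep c)))))))) = _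
  rw [pvLow_bitStep, pvLow_bitStep, pvLow_bitStep, pvLow_bitStep, pvLow_bitStep, pvLow_bitStep, pvLow_bitStep, pvLow_bitStep]

-- the two loops agree on the low 24 bits
theorem pv_loops (n : Nat) : ∀ (cA cB : Int) (m : Nat) (buffer : List Int),
    pvLow cA = pvLow cB →
    pvLow (pvLoopA n cA (m : Int) buffer) = pvLow (pvLoopB n cB (m : Int) buffer) := by
  induction n with
  | zero =>
      intro cA cB m buffer hlow
      simpa [pvLoopA, pvLoopB] using hlow
  | succ n ih =>
      intro cA cB m buffer hlow
      unfold pvLoopA pvLoopB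
      have hcast : (m : Int) + 1 = ((m + 1 : Nat) : Int) := by push_cast; ring
      rw [hcast]
      apply ih _ _ (m+1) buffer
      -- states after one byte agree on the low 24 bits
      set c1A := PySem.Int.bxor cA ((PySem.List.pyGetD buffer (m:Int) 0) <<< (16:Nat)) with hc1A
      set c1B := PySem.Int.bxor cB ((PySem.List.pyGetD buffer (m:Int) 0) <<< (16:Nat)) with hc1B
      have h1 : pvLow c1A = pvLow c1B := by
        rw [hc1A, hc1B, pvLow_bxor, pvLow_bxor, hlow]
      rw [pvLow_bits8]
      rw [pvLow_halfStep, pvLow_halfStep, h1]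
      have hFBlt : ∀ r : Nat, pvFB r < 16777216 := by
        intro r; unfold pvFB; omega
      rw [pv_core _ (hFBlt _), pv_core _ (pvLow_lt _)]

-- ===== VERDICT (by name: the statement is the Claim_ definition above) =====
theorem crc24quick_spec : Claim_equal_crc24quick := by
  unfold Claim_equal_crc24quick Spec_crc24quick Pre_crc24quick
  intro crc size buffer _ hpre
  unfold crc24quick crc24quick_alt
  rw [pv_band_mask, pv_band_mask]
  have h := pv_loops size.toNat crc crc 0 buffer rfl
  show pvLoopA size.toNat crc ((0:Nat) : Int) buffer % 16777216 = pvLoopB size.toNat crc ((0:Nat) : Int) buffer % 16777216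
  unfold pvLow at h
  omega
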